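-- pv_equiv track=rewrite | github.com/peterzpye/Personal-Portfolio | Data Mining/HW2/task1.py | to_print_format
-- ===== SOURCE A (Python) =====
-- from collections import defaultdict
--
-- def to_print_format(frequent_items):
--         length_count = defaultdict(list)
--         for x in frequent_items:
--             length_count[len(x)].append(x)
--         frequent_items_print = []
--         for pair_size in sorted(length_count.keys()):
--             pairs = length_count[pair_size]
--             frequent_items_print_subset = []
--             # pairs = [sorted(pair) for pair in pairs]
--             # pairs.sort()
--             for pair in pairs:
--                 item = '('
--                 pair = sorted([str(x) for x in pair])
--                 for i,x in enumerate(list(pair)):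
--                     item += "'" + str(x) + "'"
--                     if i != len(pair)-1:
--                         item += ', '
--                 item += ')'
--                 frequent_items_print_subset.append(item)
--             frequent_items_print_subset.sort()
--             frequent_items_print.append(frequent_items_print_subset)
--
--         return frequent_items_print
-- ===== SOURCE B (Python) =====
-- def to_print_format(frequent_items):
--     # simpler: sorted distinct sizes, then one filter+format pass per size; join-based formatting
--     sizes = sorted({len(pair) for pair in frequent_items})
--     return [
--         sorted(
--             "(" + ", ".join("'" + s + "'" for s in sorted(pair)) + ")"
--             for pair in frequent_items
--             if len(pair) == size
--         )
--         for size in sizes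
--     ]
-- ===== Notes on version B (the rewrite author's own statement) =====
-- stated objective: simpler
-- what changed: Replaces the defaultdict bucketing pass plus sorted-keys indexing with a direct computation over the sorted set of distinct sizes (one filter pass per size), and replaces the index-tracking enumerate loop that builds each itemset string with a ', '.join over the quoted sorted items.
import Mathlib
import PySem

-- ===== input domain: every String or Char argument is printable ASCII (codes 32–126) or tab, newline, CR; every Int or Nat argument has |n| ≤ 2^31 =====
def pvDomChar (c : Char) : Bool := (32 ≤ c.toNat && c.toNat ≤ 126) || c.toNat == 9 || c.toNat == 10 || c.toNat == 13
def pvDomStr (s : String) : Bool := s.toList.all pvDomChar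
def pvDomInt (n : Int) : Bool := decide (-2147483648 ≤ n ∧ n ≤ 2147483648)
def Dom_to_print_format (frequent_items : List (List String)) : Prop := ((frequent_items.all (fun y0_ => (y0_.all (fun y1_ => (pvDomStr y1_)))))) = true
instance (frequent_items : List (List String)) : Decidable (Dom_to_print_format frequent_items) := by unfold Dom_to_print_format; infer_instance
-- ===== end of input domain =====

-- B replaces the defaultdict-bucket-then-sorted-keys pass with a map over the sorted set of
-- distinct sizes (filter per size) and join-based item formatting; objective: simpler.


-- ===== PORT A =====
def to_print_format (frequent_items : List (List String)) : List (List String) :=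
  -- length_count = defaultdict(list); for x: length_count[len(x)].append(x)
  let length_count : PySem.Dict Int (List (List String)) :=
    frequent_items.foldl (fun d x => d.modify (PySem.List.len x) [] (· ++ [x])) PySem.Dict.empty
  -- for pair_size in sorted(length_count.keys()):
  (PySem.List.sorted length_count.keys (fun k => k) false).foldl
    (fun frequent_items_print pair_size =>
      let pairs := length_count.getD pair_size []
      let frequent_items_print_subset :=
        pairs.foldl
          (fun sub pair =>
            -- pair = sorted([str(x) for x in pair]); str(x) = x on String
            let pair' := PySem.List.sorted (pair.map (fun x => x)) (fun s => s) false
            let item :=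
              (PySem.List.enumerate pair' 0).foldl
                (fun item p =>
                  let item := item ++ "'" ++ p.2 ++ "'"
                  if p.1 ≠ PySem.List.len pair' - 1 then item ++ ", " else item)
                "("
            sub ++ [item ++ ")"])
          []
      frequent_items_print ++ [PySem.List.sorted frequent_items_print_subset (fun s => s) false])
    []

-- ===== PORT B =====
def to_print_format_alt (frequent_items : List (List String)) : List (List String) :=
  let sizes := PySem.List.sorted (PySem.Set.ofList (frequent_items.map PySem.List.len)) (fun k => k) false
  sizes.map (fun size =>
    PySem.List.sorted
      ((frequent_items.filter (fun pair => PySem.List.len pair == size)).map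
        (fun pair =>
          "(" ++ PySem.Str.join ", "
            ((PySem.List.sorted pair (fun s => s) false).map (fun s => "'" ++ s ++ "'")) ++ ")"))
      (fun s => s) false)

-- ===== PRECONDITION & SPEC =====
def Spec_to_print_format (frequent_items : List (List String)) (out : List (List String)) : Prop := out = to_print_format_alt frequent_items
instance (frequent_items : List (List String)) (out : List (List String)) : Decidable (Spec_to_print_format frequent_items out) := by unfold Spec_to_print_format; infer_instance

-- ===== CLAIM (what is proved, stated in full; the proofs are below) =====
def Claim_equal_to_print_format : Prop := ∀ (frequent_items : List (List String)), Dom_to_print_format frequent_items → Spec_to_print_format frequent_items (to_print_format frequent_items)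

-- ===== LEMMAS AND PROOFS =====

-- A's index-tracking separator loop equals a ", ".join of the quoted parts.
theorem fmt_loop_eq (l : List String) (acc : String) (s : Int) (n : Int)
    (h : n = s + l.length) :
    (PySem.List.enumerate l s).foldl
        (fun item p =>
          let item := item ++ "'" ++ p.2 ++ "'"
          if p.1 ≠ n - 1 then item ++ ", " else item) acc
      = acc ++ PySem.Str.join ", " (l.map (fun x => "'" ++ x ++ "'")) := by
  induction l generalizing acc s with
  | nil =>
      apply String.toList_inj.mp
      simp only [PySem.List.enumerate, List.foldl_nil, List.map_nil, String.toList_append,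
        PySem.Str.toList_join, PySem.Chars.join_nil]
      simp
  | cons x t ih =>
      have henum : PySem.List.enumerate (x :: t) s = (s, x) :: PySem.List.enumerate t (s + 1) := by
        simp [PySem.List.enumerate]
      cases t with
      | nil =>
          have hs : ¬ s ≠ n - 1 := by simp at h ⊢; omega
          rw [henum]
          simp only [PySem.List.enumerate, List.foldl_cons, List.foldl_nil, if_neg hs]
          apply String.toList_inj.mp
          simp only [List.map_cons, List.map_nil, String.toList_append, PySem.Str.toList_join,
            List.map_cons, List.map_nil, PySem.Chars.join_singleton, String.toList_append]
          simp
      | cons y tt =>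
          have hs : s ≠ n - 1 := by simp at h; omega
          have h' : n = (s + 1) + ((y :: tt).length : Int) := by simp at h ⊢; omega
          rw [henum, List.foldl_cons, ih _ (s + 1) h']
          simp only [if_pos hs]
          apply String.toList_inj.mp
          simp only [List.map_cons, String.toList_append, PySem.Str.toList_join, List.map_cons,
            PySem.Chars.join_cons_cons]
          simp

theorem dict_keys_eq (fi : List (List String)) :
    (fi.foldl (fun d x => d.modify (PySem.List.len x) [] (· ++ [x]))
        (PySem.Dict.empty : PySem.Dict Int (List (List String)))).keys
      = PySem.Set.ofList (fi.map PySem.List.len) := by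
  rw [PySem.Dict.keys_foldl_modify_key fi PySem.List.len [] (fun _ x v => v ++ [x])]
  simp [PySem.Dict.keys_empty, PySem.Set.update, PySem.Set.ofList, PySem.Set.empty]

theorem dict_getD_eq (fi : List (List String)) (k : Int) :
    (fi.foldl (fun d x => d.modify (PySem.List.len x) [] (· ++ [x]))
        (PySem.Dict.empty : PySem.Dict Int (List (List String)))).getD k []
      = fi.filter (fun pair => PySem.List.len pair == k) := by
  have : fi.foldl (fun d x => d.modify (PySem.List.len x) [] (· ++ [x]))
        (PySem.Dict.empty : PySem.Dict Int (List (List String)))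
      = (fi.map (fun x => (PySem.List.len x, x))).foldl
          (fun d p => d.modify p.1 [] (· ++ [p.2])) PySem.Dict.empty := by
    rw [List.foldl_map]
  rw [this, PySem.Dict.getD_foldl_modify_append]
  simp [PySem.Dict.getD_empty, List.filter_map, Function.comp_def, List.map_map]

-- ===== VERDICT (by name: the statement is the Claim_ definition above) =====
theorem to_print_format_spec : Claim_equal_to_print_format := by
  intro fi _
  unfold Spec_to_print_format to_print_format to_print_format_alt
  simp only [dict_keys_eq, dict_getD_eq]
  rw [PySem.List.foldl_append_singleton_eq_map]
  simp only [List.nil_append]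
  apply List.map_congr_left
  intro k _
  congr 1
  rw [PySem.List.foldl_append_singleton_eq_map]
  simp only [List.nil_append]
  apply List.map_congr_left
  intro pair _
  rw [fmt_loop_eq _ _ 0 _ (by simp [PySem.List.len, PySem.List.length_sorted])]
  simp [List.map_id']
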